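-- pv_equiv track=rewrite | github.com/MylesMor/advent-of-code | 2020/day13/shuttle_search.py | shuttle_search
-- ===== SOURCE A (Python) =====
-- def shuttle_search(earliest_time, bus_list):
--     departure_differences = {}
--     for bus in bus_list:
--         if bus != -1:
--             how_long_to_bus = bus - (earliest_time % bus)
--             departure_differences[bus] = how_long_to_bus
--     next_bus = min(departure_differences, key=departure_differences.get)
--     return next_bus * departure_differences[next_bus]
-- ===== SOURCE B (Python) =====
-- def shuttle_search(earliest_time, bus_list):
--     # Sort-then-pick: build (wait, bus) pairs for buses in service, stable-sort
--     # them by wait alone (stability keeps the earliest-listed bus among ties,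
--     # like min over the dict's insertion order), and take the first pair.
--     schedule = sorted(
--         ((bus - earliest_time % bus, bus) for bus in bus_list if bus != -1),
--         key=lambda pair: pair[0],
--     )
--     wait, bus = schedule[0]
--     return bus * wait
-- ===== Notes on version B (the rewrite author's own statement) =====
-- stated objective: alternative
-- what changed: Replaces the dict-building pass plus min(dict, key=dict.get) with a sort-then-pick strategy: build (wait, bus) pairs for in-service buses, stable-sort them by wait and take the first pair; stability preserves A's first-occurrence tie-breaking.
import Mathlib
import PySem

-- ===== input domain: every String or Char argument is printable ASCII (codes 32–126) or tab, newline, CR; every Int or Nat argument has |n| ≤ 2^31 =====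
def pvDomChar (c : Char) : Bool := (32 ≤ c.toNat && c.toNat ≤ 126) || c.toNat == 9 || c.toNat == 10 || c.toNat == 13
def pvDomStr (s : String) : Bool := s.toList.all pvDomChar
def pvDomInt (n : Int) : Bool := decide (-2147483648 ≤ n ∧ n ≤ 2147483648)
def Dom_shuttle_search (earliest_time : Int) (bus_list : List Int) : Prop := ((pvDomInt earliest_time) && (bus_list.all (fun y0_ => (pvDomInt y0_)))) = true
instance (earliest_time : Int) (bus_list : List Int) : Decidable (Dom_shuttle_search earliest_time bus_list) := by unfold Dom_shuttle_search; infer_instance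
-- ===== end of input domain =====

-- B replaces A's dict-building pass + min(dict, key=dict.get) with sort-then-pick: stable-sort the (wait, bus) pairs by wait and take the first (alternative decomposition; same return value on Pre_).


-- ===== PORT A =====
-- dict build loop, then min(departure_differences, key=departure_differences.get);
-- min() on an empty dict raises ValueError in Python and 'earliest_time % 0' raises
-- ZeroDivisionError: the port returns 0 there, both excluded by Pre_.
def shuttle_search (earliest_time : Int) (bus_list : List Int) : Int :=
  let departure_differences : PySem.Dict Int Int :=
    bus_list.foldl (fun d bus =>
      if bus = -1 then d
      else d.insert bus (bus - PySem.Int.mod earliest_time bus)) PySem.Dict.empty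
  match PySem.List.min? departure_differences.keys (fun k => departure_differences.getD k 0) with
  | some next_bus => next_bus * departure_differences.getD next_bus 0
  | none => 0

-- ===== PORT B =====
-- sorted(... generator of (wait, bus) pairs ..., key=lambda pair: pair[0]),
-- then 'wait, bus = schedule[0]'; schedule[0] on the empty list raises
-- IndexError in Python (the port returns 0 there, excluded by Pre_), and
-- '%' raises ZeroDivisionError on bus 0 (idem).
def shuttle_search_alt (earliest_time : Int) (bus_list : List Int) : Int :=
  let schedule :=
    PySem.List.sorted
      ((bus_list.filter (fun bus => bus != -1)).map
        (fun bus => (bus - PySem.Int.mod earliest_time bus, bus)))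
      (fun pair => pair.1)
  match schedule with
  | (wait, bus) :: _ => bus * wait
  | [] => 0

-- ===== PRECONDITION & SPEC =====
-- Pre_ excludes exactly the inputs where the Python A raises: a bus equal to 0
-- (ZeroDivisionError in 'earliest_time % bus') and lists with no bus ≠ -1
-- (ValueError from min() over an empty dict); B raises on exactly the same inputs.
def Pre_shuttle_search (earliest_time : Int) (bus_list : List Int) : Prop :=
  (0 : Int) ∉ bus_list ∧ bus_list.any (fun b => b != -1) = true
instance (earliest_time : Int) (bus_list : List Int) : Decidable (Pre_shuttle_search earliest_time bus_list) := by unfold Pre_shuttle_search; infer_instance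
def pvWitness_shuttle_search : Int × List Int := (939, [7, 13, -1, 59])

def Spec_shuttle_search (earliest_time : Int) (bus_list : List Int) (out : Int) : Prop := out = shuttle_search_alt earliest_time bus_list
instance (earliest_time : Int) (bus_list : List Int) (out : Int) : Decidable (Spec_shuttle_search earliest_time bus_list out) := by unfold Spec_shuttle_search; infer_instance

-- ===== CLAIM (what is proved, stated in full; the proofs are below) =====
def Claim_equal_shuttle_search : Prop := ∀ (earliest_time : Int) (bus_list : List Int), Dom_shuttle_search earliest_time bus_list → Pre_shuttle_search earliest_time bus_list → Spec_shuttle_search earliest_time bus_list (shuttle_search earliest_time bus_list)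

-- ===== LEMMAS AND PROOFS =====

-- one right-append step of Python's min(·, key=·) fold
lemma min?_append_singleton (k : Int → Int) (l : List Int) (x : Int) :
    PySem.List.min? (l ++ [x]) k
      = (match PySem.List.min? l k with
        | none => some x
        | some m => if k x < k m then some x else some m) := by
  rcases h : PySem.List.min? l k with _ | m <;>
  · have h' := h
    simp only [PySem.List.min?] at h'
    simp [PySem.List.min?, List.foldl_append, h']

-- the pair-valued twin, for B's list of (wait, bus) pairs
lemma min?_pair_append_singleton (k : Int × Int → Int) (l : List (Int × Int)) (x : Int × Int) :
    PySem.List.min? (l ++ [x]) k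
      = (match PySem.List.min? l k with
        | none => some x
        | some m => if k x < k m then some x else some m) := by
  rcases h : PySem.List.min? l k with _ | m <;>
  · have h' := h
    simp only [PySem.List.min?] at h'
    simp [PySem.List.min?, List.foldl_append, h']

-- a loop that skips -1 is the same loop over the filtered list
lemma foldl_skip_neg_one {σ : Type} (g : σ → Int → σ) :
    ∀ (l : List Int) (s : σ),
      l.foldl (fun s b => if b = -1 then s else g s b) s
        = (l.filter (fun b => b != -1)).foldl g s := by
  intro l
  induction l with
  | nil => intro s; rfl
  | cons x t ih =>
    intro s
    by_cases hx : x = -1 <;> simp [hx, ih]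

-- every key the dict-building loop has seen maps to its wait value
lemma getD_fold_insert (w : Int → Int) :
    ∀ (xs : List Int) (d : PySem.Dict Int Int) (k : Int),
      (xs.foldl (fun d b => d.insert b (w b)) d).getD k 0
        = if k ∈ xs then w k else d.getD k 0 := by
  intro xs
  induction xs with
  | nil => intro d k; simp
  | cons x t ih =>
    intro d k
    simp only [List.foldl_cons, ih, List.mem_cons]
    by_cases ht : k ∈ t
    · simp [ht]
    · by_cases hk : k = x <;> simp [ht, hk, PySem.Dict.getD_insert]

-- min? only depends on the key function's values on the list
lemma min?_key_congr (k1 k2 : Int → Int) (l : List Int)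
    (h : ∀ x ∈ l, k1 x = k2 x) :
    PySem.List.min? l k1 = PySem.List.min? l k2 := by
  induction l using List.reverseRecOn with
  | nil => rfl
  | append_singleton t x ih =>
    have ht : ∀ y ∈ t, k1 y = k2 y := fun y hy => h y (by simp [hy])
    have hx : k1 x = k2 x := h x (by simp)
    rw [min?_append_singleton, min?_append_singleton, ih ht]
    rcases hm : PySem.List.min? t k2 with _ | m
    · rfl
    · have hmem : m ∈ t := PySem.List.min?_mem hm
      simp [hx, ht m hmem]

-- set(xs) keeps first occurrences; dropping later duplicates keeps the first minimum
lemma min?_ofList (f : Int → Int) (xs : List Int) :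
    PySem.List.min? (PySem.Set.ofList xs) f = PySem.List.min? xs f := by
  induction xs using List.reverseRecOn with
  | nil => rfl
  | append_singleton t x ih =>
    rw [PySem.Set.ofList_append_singleton, min?_append_singleton]
    by_cases hx : x ∈ t
    · have hmem : x ∈ PySem.Set.ofList t := (PySem.Set.mem_ofList t x).mpr hx
      rw [PySem.Set.add_of_mem hmem, ih]
      rcases h : PySem.List.min? t f with _ | m
      · have : t = [] := (PySem.List.min?_eq_none_iff t f).mp h
        subst this; simp at hx
      · have hle : f m ≤ f x := PySem.List.min?_isMin h x hx
        simp [not_lt.mpr hle]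
    · have hmem : x ∉ PySem.Set.ofList t := fun hc => hx ((PySem.Set.mem_ofList t x).mp hc)
      rw [PySem.Set.add_of_not_mem hmem, min?_append_singleton, ih]

-- one right-append step of the stable insertion sort
lemma sorted_append_singleton (k : Int × Int → Int) (l : List (Int × Int)) (x : Int × Int) :
    PySem.List.sorted (l ++ [x]) k false
      = PySem.List.insertBy (fun a b => decide (k a < k b)) x (PySem.List.sorted l k false) := by
  rw [PySem.List.sorted_eq_foldl_insertBy, PySem.List.sorted_eq_foldl_insertBy,
    List.foldl_append, List.foldl_cons, List.foldl_nil]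

-- the head of the stable sort is the FIRST key-minimal element, i.e. Python's min(·, key=·)
lemma head?_sorted (k : Int × Int → Int) (xs : List (Int × Int)) :
    (PySem.List.sorted xs k false).head? = PySem.List.min? xs k := by
  induction xs using List.reverseRecOn with
  | nil => rfl
  | append_singleton t x ih =>
    rw [sorted_append_singleton, min?_pair_append_singleton]
    rcases h : PySem.List.sorted t k false with _ | ⟨m, r⟩
    · have ht : t = [] := (PySem.List.sorted_eq_nil_iff t k false).mp h
      subst ht
      simp [PySem.List.insertBy, PySem.List.min?]
    · have hmin : PySem.List.min? t k = some m := by rw [← ih, h]; rfl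
      rw [hmin]
      have hins : PySem.List.insertBy (fun a b => decide (k a < k b)) x (m :: r)
          = if k x < k m then x :: m :: r
            else m :: PySem.List.insertBy (fun a b => decide (k a < k b)) x r := by
        simp [PySem.List.insertBy]
      rw [hins]
      by_cases hc : k x < k m <;> simp [hc]

-- min? over a mapped list is min? with the composed key
lemma min?_map (f : Int → Int × Int) (k : Int × Int → Int) (xs : List Int) :
    PySem.List.min? (xs.map f) k = (PySem.List.min? xs (fun b => k (f b))).map f := by
  induction xs using List.reverseRecOn with
  | nil => rfl
  | append_singleton t x ih =>
    rw [List.map_append, List.map_singleton, min?_pair_append_singleton,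
      min?_append_singleton, ih]
    rcases h : PySem.List.min? t (fun b => k (f b)) with _ | m
    · rfl
    · by_cases hc : k (f x) < k (f m) <;> simp [hc]

-- ===== VERDICT (by name: the statement is the Claim_ definition above) =====
theorem shuttle_search_spec : Claim_equal_shuttle_search := by
  intro earliest_time bus_list _ _
  unfold Spec_shuttle_search
  have hA : shuttle_search earliest_time bus_list
      = (match PySem.List.min?
            (bus_list.foldl (fun d bus =>
              if bus = -1 then d
              else d.insert bus (bus - PySem.Int.mod earliest_time bus)) PySem.Dict.empty).keys
            (fun k => (bus_list.foldl (fun d bus =>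
              if bus = -1 then d
              else d.insert bus (bus - PySem.Int.mod earliest_time bus)) PySem.Dict.empty).getD k 0) with
        | some next_bus => next_bus * (bus_list.foldl (fun d bus =>
              if bus = -1 then d
              else d.insert bus (bus - PySem.Int.mod earliest_time bus)) PySem.Dict.empty).getD next_bus 0
        | none => 0) := rfl
  rw [hA, foldl_skip_neg_one (σ := PySem.Dict Int Int) (fun d bus => d.insert bus (bus - PySem.Int.mod earliest_time bus))]
  have hB : shuttle_search_alt earliest_time bus_list
      = (match (PySem.List.sorted
            ((bus_list.filter (fun bus => bus != -1)).map
              (fun bus => (bus - PySem.Int.mod earliest_time bus, bus)))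
            (fun pair => pair.1) false) with
        | (wait, bus) :: _ => bus * wait
        | [] => 0) := rfl
  have hhead := head?_sorted (fun pair : Int × Int => pair.1)
      ((bus_list.filter (fun bus => bus != -1)).map
        (fun bus => (bus - PySem.Int.mod earliest_time bus, bus)))
  rw [min?_map] at hhead
  have hkeys : (List.foldl (fun d b => d.insert b (b - PySem.Int.mod earliest_time b))
        PySem.Dict.empty (bus_list.filter (fun b => b != -1))).keys
      = PySem.Set.ofList (bus_list.filter (fun b => b != -1)) := by
    rw [PySem.Dict.keys_foldl_insert]
    simp [PySem.Set.update_nil_left]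
  have hget : ∀ k ∈ bus_list.filter (fun b => b != -1),
      (List.foldl (fun d b => d.insert b (b - PySem.Int.mod earliest_time b))
        PySem.Dict.empty (bus_list.filter (fun b => b != -1))).getD k 0
      = k - PySem.Int.mod earliest_time k := by
    intro k hk
    rw [getD_fold_insert (fun b => b - PySem.Int.mod earliest_time b) _ PySem.Dict.empty k,
      if_pos hk]
  rw [hkeys,
    min?_key_congr _ (fun b => b - PySem.Int.mod earliest_time b) _
      (fun k hk => hget k ((PySem.Set.mem_ofList _ k).mp hk)),
    min?_ofList]
  rw [hB]
  rcases h : PySem.List.min? (bus_list.filter (fun b => b != -1))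
      (fun b => b - PySem.Int.mod earliest_time b) with _ | m
  · rw [h] at hhead
    rcases hs : PySem.List.sorted
        ((bus_list.filter (fun bus => bus != -1)).map
          (fun bus => (bus - PySem.Int.mod earliest_time bus, bus)))
        (fun pair => pair.1) false with _ | ⟨p, r⟩
    · rfl
    · rw [hs] at hhead; simp at hhead
  · have hm : m ∈ bus_list.filter (fun b => b != -1) := PySem.List.min?_mem h
    rw [h] at hhead
    rcases hs : PySem.List.sorted
        ((bus_list.filter (fun bus => bus != -1)).map
          (fun bus => (bus - PySem.Int.mod earliest_time bus, bus)))
        (fun pair => pair.1) false with _ | ⟨p, r⟩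
    · rw [hs] at hhead; simp at hhead
    · rw [hs] at hhead
      simp only [List.head?_cons, Option.map_some] at hhead
      obtain ⟨rfl⟩ := Option.some.injEq _ _ ▸ hhead
      simp [hget m hm]
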